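-- pv_equiv track=rewrite | github.com/carinasauter/Gutenberg | gutenberg_webscraper.py | add_to_dict
-- ===== SOURCE A (Python) =====
-- def add_to_dict(dict, list_of_words, total_num_books, book_index):
--     for word in list_of_words:
--         if word in dict:
--             dict[word][book_index] = dict[word][book_index] + 1
--         else:
--             dict[word] = []
--             x = 0
--             while x < total_num_books:
--                 dict[word].append(0)
--                 x += 1
--             dict[word][book_index] = 1
--     return dict
-- ===== SOURCE B (Python) =====
-- def add_to_dict(dict, list_of_words, total_num_books, book_index):
--     counts = {}
--     for word in list_of_words:
--         counts[word] = counts.get(word, 0) + 1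
--     for word, c in counts.items():
--         if word not in dict:
--             dict[word] = [0] * total_num_books
--         dict[word][book_index] += c
--     return dict
-- ===== Notes on version B (the rewrite author's own statement) =====
-- stated objective: alternative
-- what changed: A increments the word's vector once per occurrence while scanning the word list; B first builds a frequency table in one pass and then, per DISTINCT word, initializes the zero vector if needed and adds the aggregated count in a single update, replacing A's per-new-word while-append loop by [0]*total_num_books.
import Mathlib
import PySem

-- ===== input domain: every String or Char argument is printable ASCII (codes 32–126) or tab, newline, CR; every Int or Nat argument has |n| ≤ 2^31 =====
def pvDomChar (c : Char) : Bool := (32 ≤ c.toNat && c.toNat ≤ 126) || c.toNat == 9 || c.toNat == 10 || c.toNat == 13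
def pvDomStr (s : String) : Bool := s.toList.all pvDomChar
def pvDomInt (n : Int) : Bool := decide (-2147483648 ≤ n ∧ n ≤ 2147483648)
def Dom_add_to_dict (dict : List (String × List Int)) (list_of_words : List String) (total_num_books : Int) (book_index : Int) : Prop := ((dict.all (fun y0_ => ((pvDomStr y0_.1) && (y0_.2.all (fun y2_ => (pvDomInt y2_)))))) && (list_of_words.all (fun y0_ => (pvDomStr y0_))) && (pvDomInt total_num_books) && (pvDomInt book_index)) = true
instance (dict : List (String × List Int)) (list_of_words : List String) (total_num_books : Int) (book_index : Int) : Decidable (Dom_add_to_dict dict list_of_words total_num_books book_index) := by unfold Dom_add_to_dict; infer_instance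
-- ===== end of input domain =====

-- B replaces A's per-occurrence increments by a count-first pass and one aggregated
-- update per distinct word ('alternative'; both mutate the dict argument in place in
-- Python — the equivalence proved here is about the returned value).

-- ===== PORT A =====
def add_to_dict (dict : List (String × List Int)) (list_of_words : List String) (total_num_books : Int) (book_index : Int) : List (String × List Int) :=
  (list_of_words.foldl (fun d w =>
      if d.contains w then
        -- dict[word][book_index] = dict[word][book_index] + 1
        let v := d.getD w []
        d.insert w (PySem.List.pySetD v book_index (PySem.List.pyGetD v book_index 0 + 1))
      else
        -- dict[word] = []; x = 0; while x < total_num_books: append 0; x += 1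
        let zeros := (PySem.List.pyRange 0 total_num_books 1).foldl (fun a _ => a ++ [(0 : Int)]) []
        -- dict[word][book_index] = 1
        d.insert w (PySem.List.pySetD zeros book_index 1))
    (PySem.Dict.mk dict)).items

-- ===== PORT B =====
def add_to_dict_alt (dict : List (String × List Int)) (list_of_words : List String) (total_num_books : Int) (book_index : Int) : List (String × List Int) :=
  -- counts = {}; for word in list_of_words: counts[word] = counts.get(word, 0) + 1
  let counts := list_of_words.foldl (fun d w => d.insert w (d.getD w 0 + 1)) PySem.Dict.empty
  -- for word, c in counts.items(): …
  (counts.items.foldl (fun d p =>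
      let d1 := if d.contains p.1 then d else d.insert p.1 (PySem.List.pyRepeat [(0 : Int)] total_num_books)
      let v := d1.getD p.1 []
      d1.insert p.1 (PySem.List.pySetD v book_index (PySem.List.pyGetD v book_index 0 + p.2)))
    (PySem.Dict.mk dict)).items

-- ===== PRECONDITION & SPEC =====
-- Pre_ excludes exactly the inputs where Python raises IndexError: book_index out of
-- range for the vector the indexed word has (its existing vector, or the fresh
-- total_num_books-long zero vector of a word not yet in dict).
def Pre_add_to_dict (dict : List (String × List Int)) (list_of_words : List String) (total_num_books : Int) (book_index : Int) : Prop :=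
  ∀ w ∈ list_of_words,
    PySem.Raise.InRange ((((PySem.Dict.mk dict).get? w).map List.length).getD total_num_books.toNat) book_index
instance (dict : List (String × List Int)) (list_of_words : List String) (total_num_books : Int) (book_index : Int) : Decidable (Pre_add_to_dict dict list_of_words total_num_books book_index) := by unfold Pre_add_to_dict; infer_instance
def pvWitness_add_to_dict : (List (String × List Int)) × List String × Int × Int :=
  ([("a", [0, 4])], ["b", "a", "b"], 2, 1)
def Spec_add_to_dict (dict : List (String × List Int)) (list_of_words : List String) (total_num_books : Int) (book_index : Int) (out : List (String × List Int)) : Prop := out = add_to_dict_alt dict list_of_words total_num_books book_index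
instance (dict : List (String × List Int)) (list_of_words : List String) (total_num_books : Int) (book_index : Int) (out : List (String × List Int)) : Decidable (Spec_add_to_dict dict list_of_words total_num_books book_index out) := by unfold Spec_add_to_dict; infer_instance

-- ===== CLAIM (what is proved, stated in full; the proofs are below) =====
def Claim_equal_add_to_dict : Prop := ∀ (dict : List (String × List Int)) (list_of_words : List String) (total_num_books : Int) (book_index : Int), Dom_add_to_dict dict list_of_words total_num_books book_index → Pre_add_to_dict dict list_of_words total_num_books book_index → Spec_add_to_dict dict list_of_words total_num_books book_index (add_to_dict dict list_of_words total_num_books book_index)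

-- ===== LEMMAS AND PROOFS =====

-- the zero vector a new word starts from
def pvZvec (tot : Int) : List Int := List.replicate tot.toNat 0

-- one aggregated update: B's loop body as a function of the word and its count
def pvApply (tot bi : Int) (d : PySem.Dict String (List Int)) (w : String) (c : Int) : PySem.Dict String (List Int) :=
  let d1 := if d.contains w then d else d.insert w (pvZvec tot)
  let v := d1.getD w []
  d1.insert w (PySem.List.pySetD v bi (PySem.List.pyGetD v bi 0 + c))

theorem pvIdx_lt {n : Nat} {i : Int} {k : Nat} (h : PySem.List.pyIdx? n i = some k) : k < n := by
  unfold PySem.List.pyIdx? at h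
  split_ifs at h <;> simp_all <;> omega

theorem pvGetD_setD_self (v : List Int) (i : Int) (a d : Int) :
    PySem.List.pyGetD (PySem.List.pySetD v i a) i d =
      if (PySem.List.pyIdx? v.length i).isSome then a else d := by
  rcases h : PySem.List.pyIdx? v.length i with _ | k
  · simp [PySem.List.pyGetD, PySem.List.pyGet?, PySem.List.pySetD, PySem.List.pySet?, h]
  · have hk := pvIdx_lt h
    simp [PySem.List.pyGetD, PySem.List.pyGet?, PySem.List.pySetD, PySem.List.pySet?, h,
      List.getElem?_set_self hk]

theorem pvSetD_setD_self (v : List Int) (i : Int) (a b : Int) :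
    PySem.List.pySetD (PySem.List.pySetD v i a) i b = PySem.List.pySetD v i b := by
  rcases h : PySem.List.pyIdx? v.length i with _ | k
  · simp [PySem.List.pySetD, PySem.List.pySet?, h]
  · simp [PySem.List.pySetD, PySem.List.pySet?, h, List.set_set]

theorem pvGetD_replicate (n : Nat) (i : Int) :
    PySem.List.pyGetD (List.replicate n (0 : Int)) i 0 = 0 := by
  rcases h : PySem.List.pyIdx? n i with _ | k
  · simp [PySem.List.pyGetD, PySem.List.pyGet?, h]
  · have hk := pvIdx_lt h
    simp [PySem.List.pyGetD, PySem.List.pyGet?, h, List.getElem?_replicate, hk]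

-- pvApply is a single insert of a value computed from the OLD dict
def pvNewval (tot bi : Int) (d : PySem.Dict String (List Int)) (w : String) (c : Int) : List Int :=
  let v := if d.contains w then d.getD w [] else pvZvec tot
  PySem.List.pySetD v bi (PySem.List.pyGetD v bi 0 + c)

theorem pvApply_eq_insert (tot bi : Int) (d : PySem.Dict String (List Int)) (w : String) (c : Int) :
    pvApply tot bi d w c = d.insert w (pvNewval tot bi d w c) := by
  unfold pvApply pvNewval
  by_cases h : d.contains w = true
  · simp [h]
  · simp only [h, Bool.not_eq_true] at *
    simp [PySem.Dict.getD_insert_self, PySem.Dict.insert_insert_self]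

theorem pvNewval_insert_ne (tot bi : Int) (d : PySem.Dict String (List Int)) (w w' : String)
    (x : List Int) (c : Int) (hne : w ≠ w') :
    pvNewval tot bi (d.insert w' x) w c = pvNewval tot bi d w c := by
  unfold pvNewval
  rw [PySem.Dict.contains_insert, PySem.Dict.getD_insert_of_ne _ _ _ hne]
  simp [hne]

theorem pvContains_apply (tot bi : Int) (d : PySem.Dict String (List Int)) (w u : String) (c : Int)
    (h : d.contains w = true) : (pvApply tot bi d u c).contains w = true := by
  rw [pvApply_eq_insert]
  simp [PySem.Dict.contains_insert, h]

theorem pvInsert_comm (d : PySem.Dict String (List Int)) (w w' : String) (a b : List Int)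
    (hne : w ≠ w') (hw : d.contains w = true) :
    (d.insert w a).insert w' b = (d.insert w' b).insert w a := by
  apply PySem.Dict.ext
  by_cases h' : d.contains w' = true
  · have h1 : (d.insert w a).contains w' = true := by
      simp [PySem.Dict.contains_insert, h']
    have h2 : (d.insert w' b).contains w = true := by
      simp [PySem.Dict.contains_insert, hw]
    rw [PySem.Dict.items_insert_of_contains _ _ h1, PySem.Dict.items_insert_of_contains _ _ hw,
      PySem.Dict.items_insert_of_contains _ _ h2, PySem.Dict.items_insert_of_contains _ _ h']
    simp only [List.map_map]
    apply List.map_congr_left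
    intro p _
    by_cases hpw : p.1 = w <;> by_cases hpw' : p.1 = w' <;>
      simp_all [Function.comp, Ne.symm hne]
  · have h'f : d.contains w' = false := by simpa using h'
    have h1 : (d.insert w a).contains w' = false := by
      simp [PySem.Dict.contains_insert, h', Ne.symm hne]
    have h2 : (d.insert w' b).contains w = true := by
      simp [PySem.Dict.contains_insert, hw]
    rw [PySem.Dict.items_insert_of_not_contains _ _ h1, PySem.Dict.items_insert_of_contains _ _ hw,
      PySem.Dict.items_insert_of_contains _ _ h2, PySem.Dict.items_insert_of_not_contains _ _ h'f]
    simp only [List.map_append, List.map_cons, List.map_nil]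
    congr 1
    simp [Ne.symm hne]

theorem pvMergeList (v : List Int) (bi c1 c2 : Int) :
    PySem.List.pySetD (PySem.List.pySetD v bi (PySem.List.pyGetD v bi 0 + c1)) bi
        (PySem.List.pyGetD (PySem.List.pySetD v bi (PySem.List.pyGetD v bi 0 + c1)) bi 0 + c2) =
      PySem.List.pySetD v bi (PySem.List.pyGetD v bi 0 + (c1 + c2)) := by
  rcases h : PySem.List.pyIdx? v.length bi with _ | k
  · have hs2 : ∀ (u : List Int) (a : Int), u.length = v.length → PySem.List.pySetD u bi a = u := by
      intro u a hu; simp [PySem.List.pySetD, PySem.List.pySet?, hu, h]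
    rw [hs2 v _ rfl, hs2 v _ rfl, hs2 v _ rfl]
  · have hg : PySem.List.pyGetD (PySem.List.pySetD v bi (PySem.List.pyGetD v bi 0 + c1)) bi 0 =
        PySem.List.pyGetD v bi 0 + c1 := by
      rw [pvGetD_setD_self]; simp [h]
    rw [hg, pvSetD_setD_self]
    congr 1
    ring

theorem pvMerge (tot bi : Int) (d : PySem.Dict String (List Int)) (w : String) (c1 c2 : Int) :
    pvApply tot bi (pvApply tot bi d w c1) w c2 = pvApply tot bi d w (c1 + c2) := by
  unfold pvApply
  by_cases h : d.contains w = true <;>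
    simp only [h, if_true, PySem.Dict.contains_insert_self,
      PySem.Dict.getD_insert_self, PySem.Dict.insert_insert_self] <;>
    exact congrArg _ (pvMergeList _ bi c1 c2)

theorem pvCommute (tot bi : Int) (d : PySem.Dict String (List Int)) (w w' : String) (c c' : Int)
    (hne : w ≠ w') (hw : d.contains w = true) :
    pvApply tot bi (pvApply tot bi d w' c') w c = pvApply tot bi (pvApply tot bi d w c) w' c' := by
  calc pvApply tot bi (pvApply tot bi d w' c') w c
      = (d.insert w' (pvNewval tot bi d w' c')).insert w (pvNewval tot bi d w c) := by
        rw [pvApply_eq_insert, pvApply_eq_insert, pvNewval_insert_ne tot bi d w w' _ c hne]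
    _ = (d.insert w (pvNewval tot bi d w c)).insert w' (pvNewval tot bi d w' c') :=
        (pvInsert_comm d w w' _ _ hne hw).symm
    _ = pvApply tot bi (pvApply tot bi d w c) w' c' := by
        rw [pvApply_eq_insert tot bi d w c, pvApply_eq_insert,
          pvNewval_insert_ne tot bi d w' w _ c' (Ne.symm hne)]

-- pull the (unique) step of word w to the front of a fold over distinct words
theorem pvPull (tot bi : Int) (cnt : String → Int) (w : String) :
    ∀ (s : List String) (d : PySem.Dict String (List Int)), s.Nodup → w ∈ s → d.contains w = true →
      s.foldl (fun e u => pvApply tot bi e u (cnt u)) d =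
        (s.erase w).foldl (fun e u => pvApply tot bi e u (cnt u)) (pvApply tot bi d w (cnt w)) := by
  intro s
  induction s with
  | nil => intro d _ hw; simp at hw
  | cons a t ih =>
    intro d hnd hmem hc
    by_cases haw : a = w
    · subst haw
      rw [List.erase_cons_head]
      simp only [List.foldl_cons]
    · have hwt : w ∈ t := by
        rcases List.mem_cons.1 hmem with h | h
        · exact absurd h.symm haw
        · exact h
      have herase : (a :: t).erase w = a :: t.erase w :=
        List.erase_cons_tail (by simp [haw])
      rw [herase]
      simp only [List.foldl_cons]
      rw [ih (pvApply tot bi d a (cnt a)) hnd.of_cons hwt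
        (pvContains_apply tot bi _ w a (cnt a) hc)]
      rw [pvCommute tot bi d w a (cnt w) (cnt a) (Ne.symm haw) hc]

-- A's per-occurrence pass equals B's aggregated pass over the distinct words
theorem pvMain (tot bi : Int) :
    ∀ (l : List String) (d : PySem.Dict String (List Int)),
      l.foldl (fun e u => pvApply tot bi e u 1) d =
        (PySem.Set.ofList l).foldl (fun e u => pvApply tot bi e u (l.count u : Int)) d := by
  intro l
  induction l with
  | nil => intro d; rfl
  | cons w rest ih =>
    intro d
    simp only [List.foldl_cons]
    rw [ih (pvApply tot bi d w 1), PySem.Set.ofList_cons]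
    simp only [List.foldl_cons]
    rw [PySem.List.foldl_congr_mem _
      (fun e u => pvApply tot bi e u ((w :: rest).count u : Int))
      (fun e u => pvApply tot bi e u ((rest.count u : Int)))
      _
      (by
        intro acc x hx
        have hxne : x ≠ w := ((PySem.Set.mem_discard _ _ _).1 hx).2
        have hcx : (w :: rest).count x = rest.count x := by
          rw [List.count_cons]; simp [Ne.symm hxne]
        show pvApply tot bi acc x ((w :: rest).count x : Int) =
          pvApply tot bi acc x ((rest.count x : Int))
        rw [hcx])]
    by_cases hw : w ∈ rest
    · have hcnt : ((w :: rest).count w : Int) = 1 + (rest.count w : Int) := by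
        rw [List.count_cons]; simp; ring
      rw [hcnt, ← pvMerge tot bi d w 1 (rest.count w : Int)]
      have hmem : w ∈ PySem.Set.ofList rest := (PySem.Set.mem_ofList rest w).2 hw
      have hnd := PySem.Set.nodup_ofList rest
      have hcontains : (pvApply tot bi d w 1).contains w = true := by
        rw [pvApply_eq_insert]; exact PySem.Dict.contains_insert_self _ _ _
      rw [pvPull tot bi (fun u => (rest.count u : Int)) w (PySem.Set.ofList rest)
        (pvApply tot bi d w 1) hnd hmem hcontains]
      have hde : (PySem.Set.ofList rest).discard w = (PySem.Set.ofList rest).erase w := by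
        rw [List.Nodup.erase_eq_filter hnd]
        rfl
      rw [hde]
    · have hw0 : rest.count w = 0 := List.count_eq_zero_of_not_mem hw
      have hcnt1 : ((w :: rest).count w : Int) = 1 := by
        rw [List.count_cons]; simp [hw0]
      have hde : (PySem.Set.ofList rest).discard w = PySem.Set.ofList rest := by
        apply List.filter_eq_self.2
        intro x hx
        have hxw : x ≠ w := by
          intro h; subst h; exact hw ((PySem.Set.mem_ofList rest x).1 hx)
        simp [hxw]
      rw [hcnt1, hde]

theorem pvStepA (tot bi : Int) (d : PySem.Dict String (List Int)) (w : String) :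
    (if d.contains w then
        let v := d.getD w []
        d.insert w (PySem.List.pySetD v bi (PySem.List.pyGetD v bi 0 + 1))
      else
        let zeros := (PySem.List.pyRange 0 tot 1).foldl (fun a _ => a ++ [(0 : Int)]) []
        d.insert w (PySem.List.pySetD zeros bi 1)) = pvApply tot bi d w 1 := by
  unfold pvApply
  by_cases h : d.contains w = true
  · simp [h]
  · have hzeros : (PySem.List.pyRange 0 tot 1).foldl (fun a _ => a ++ [(0 : Int)]) [] = pvZvec tot := by
      rw [PySem.List.foldl_append_singleton_eq_map (fun _ => (0 : Int))]
      simp only [List.nil_append, List.map_const']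
      rw [PySem.List.length_pyRange_one]
      unfold pvZvec
      norm_num
    simp only [h, Bool.not_eq_true] at *
    simp only [Bool.false_eq_true, if_false, hzeros,
      PySem.Dict.getD_insert_self, PySem.Dict.insert_insert_self]
    rw [show pvZvec tot = List.replicate tot.toNat 0 from rfl, pvGetD_replicate]
    norm_num

-- ===== VERDICT (by name: the statement is the Claim_ definition above) =====
theorem add_to_dict_spec : Claim_equal_add_to_dict := by
  intro dict l tot bi _ _
  unfold Spec_add_to_dict add_to_dict add_to_dict_alt
  congr 1
  rw [PySem.Dict.foldl_insert_getD_add_one_eq_counter, PySem.Dict.items_counter, List.foldl_map]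
  rw [show (fun (d : PySem.Dict String (List Int)) (w : String) =>
      if d.contains w then
        let v := d.getD w []
        d.insert w (PySem.List.pySetD v bi (PySem.List.pyGetD v bi 0 + 1))
      else
        let zeros := (PySem.List.pyRange 0 tot 1).foldl (fun a _ => a ++ [(0 : Int)]) []
        d.insert w (PySem.List.pySetD zeros bi 1))
      = fun d w => pvApply tot bi d w 1 from funext fun d => funext fun w => pvStepA tot bi d w]
  rw [pvMain tot bi l (PySem.Dict.mk dict)]
  apply PySem.List.foldl_congr_mem
  intro acc x _
  simp only [pvApply, pvZvec, PySem.List.pyRepeat_singleton]
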